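-- pv_equiv track=rewrite | github.com/ivan0703/leetcode | 975. Odd Even Jump/main.py | oddEvenJumps_v2
-- ===== SOURCE A (Python) =====
-- from typing import List
-- import bisect
--
-- def oddEvenJumps_v2(A: List[int]) -> int:
--     N = len(A)
--     dp_odd  = [False] * (N-1) + [True]
--     dp_even = [False] * (N-1) + [True]
--
--     vals = [[A[N-1],N-1]]
--     res = 1
--     for i in range(N-2, -1, -1):
--         keys = [r[0] for r in vals]
--         lo = bisect.bisect_left(keys, A[i])
--         hi = bisect.bisect_right(keys, A[i])
--         if lo < len(vals):
--             dp_odd[i] = dp_even[vals[lo][1]]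
--             if dp_odd[i]:
--                 res += 1
--
--         if hi > 0:
--             dp_even[i] = dp_odd[vals[hi-1][1]]
--
--         if lo < len(vals) and vals[lo][0] == A[i]:
--             vals[lo][1] = i
--         else:
--             vals.insert(lo, [A[i],i])
--     return res
-- ===== SOURCE B (Python) =====
-- from typing import List
--
-- def oddEvenJumps_v2(A: List[int]) -> int:
--     N = len(A)
--     odd = [False] * N
--     even = [False] * N
--     odd[N-1] = True
--     even[N-1] = True
--     res = 1
--     for i in range(N-2, -1, -1):
--         up = None    # index j > i with smallest A[j] >= A[i], earliest on ties
--         down = None  # index j > i with largest  A[j] <= A[i], earliest on ties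
--         for j in range(i+1, N):
--             if A[j] >= A[i] and (up is None or A[j] < A[up]):
--                 up = j
--             if A[j] <= A[i] and (down is None or A[j] > A[down]):
--                 down = j
--         if up is not None:
--             odd[i] = even[up]
--             if odd[i]:
--                 res += 1
--         if down is not None:
--             even[i] = odd[down]
--     return res
-- ===== Notes on version B (the rewrite author's own statement) =====
-- stated objective: alternative
-- what changed: A maintains a bisect-searched sorted list of (value, first index) pairs while walking backwards; B drops that data structure entirely and, for each start index, finds the odd-jump target (smallest value >= A[i], earliest on ties) and even-jump target (largest value <= A[i], earliest on ties) by a direct scan of the suffix, then does the same backward DP.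
import Mathlib
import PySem

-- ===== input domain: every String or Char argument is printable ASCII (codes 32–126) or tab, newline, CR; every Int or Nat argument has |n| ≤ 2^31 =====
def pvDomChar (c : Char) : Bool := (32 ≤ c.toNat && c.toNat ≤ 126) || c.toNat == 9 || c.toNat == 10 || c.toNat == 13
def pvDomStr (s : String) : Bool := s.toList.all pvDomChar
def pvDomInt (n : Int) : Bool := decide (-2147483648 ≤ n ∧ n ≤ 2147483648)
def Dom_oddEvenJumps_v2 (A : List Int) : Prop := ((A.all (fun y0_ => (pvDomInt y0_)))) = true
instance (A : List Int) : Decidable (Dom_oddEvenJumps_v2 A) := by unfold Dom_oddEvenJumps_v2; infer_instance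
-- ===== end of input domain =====

-- B replaces A's sorted list + bisect bookkeeping with a direct backward DP whose
-- odd/even jump targets are found by a plain scan of the suffix (objective: alternative).

-- ===== PORT A =====
-- A's state: `vals` (sorted [value, index] pairs), the two dp arrays, and the counter.
structure StA where
  vals : List (Int × Nat)
  dpO  : List Bool
  dpE  : List Bool
  res  : Int
  deriving Repr, DecidableEq

-- Python's bisect.bisect_left / bisect_right; on the sorted key lists A maintains they
-- equal the number of keys < x (resp. ≤ x), which is what we transcribe.
def bisectLeft (keys : List Int) (x : Int) : Nat := keys.countP (fun k => decide (k < x))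
def bisectRight (keys : List Int) (x : Int) : Nat := keys.countP (fun k => decide (k ≤ x))

-- one iteration of A's `for i in range(N-2, -1, -1)` body
def stepA (a : List Int) (i : Nat) (s : StA) : StA :=
  let x := a.getD i 0
  let keys := s.vals.map Prod.fst
  let lo := bisectLeft keys x
  let hi := bisectRight keys x
  -- if lo < len(vals): dp_odd[i] = dp_even[vals[lo][1]]
  let dpO1 := if lo < s.vals.length then
      s.dpO.set i (s.dpE.getD (s.vals.getD lo (0, 0)).2 false) else s.dpO
  -- if dp_odd[i]: res += 1   (inside the same `if`)
  let res1 := if lo < s.vals.length ∧ dpO1.getD i false = true then s.res + 1 else s.res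
  -- if hi > 0: dp_even[i] = dp_odd[vals[hi-1][1]]
  let dpE1 := if 0 < hi then
      s.dpE.set i (dpO1.getD (s.vals.getD (hi - 1) (0, 0)).2 false) else s.dpE
  -- vals[lo][1] = i  /  vals.insert(lo, [A[i], i])
  let vals1 := if lo < s.vals.length ∧ (s.vals.getD lo (0, 0)).1 = x then
      s.vals.set lo (x, i) else s.vals.insertIdx lo (x, i)
  ⟨vals1, dpO1, dpE1, res1⟩

-- the loop, processing indices n-1, n-2, …, 0
def loopA (a : List Int) : Nat → StA → StA
  | 0, s => s
  | n + 1, s => loopA a n (stepA a n s)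

def oddEvenJumps_v2 (A : List Int) : Int :=
  let N := A.length
  let dp0 : List Bool := List.replicate (N - 1) false ++ [true]
  (loopA A (N - 1) ⟨[(A.getD (N - 1) 0, N - 1)], dp0, dp0, 1⟩).res

-- ===== PORT B =====
structure StB where
  odd  : List Bool
  even : List Bool
  res  : Int
  deriving Repr, DecidableEq

-- body of B's inner `for j in range(i+1, N)` scan; state = (up, down)
-- `if A[j] >= A[i] and (up is None or A[j] < A[up]): up = j`
def updUp (a : List Int) (x : Int) (o : Option Nat) (j : Nat) : Option Nat :=
  match o with
  | none => if x ≤ a.getD j 0 then some j else none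
  | some u => if x ≤ a.getD j 0 ∧ a.getD j 0 < a.getD u 0 then some j else some u

-- `if A[j] <= A[i] and (down is None or A[j] > A[down]): down = j`
def updDown (a : List Int) (x : Int) (o : Option Nat) (j : Nat) : Option Nat :=
  match o with
  | none => if a.getD j 0 ≤ x then some j else none
  | some d => if a.getD j 0 ≤ x ∧ a.getD d 0 < a.getD j 0 then some j else some d

def scanStep (a : List Int) (x : Int) (s : Option Nat × Option Nat) (j : Nat) :
    Option Nat × Option Nat :=
  (updUp a x s.1 j, updDown a x s.2 j)

-- the whole inner scan over j = i+1, …, N-1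
def scanPair (a : List Int) (x : Int) (i : Nat) : Option Nat × Option Nat :=
  (List.range' (i + 1) (a.length - (i + 1))).foldl (scanStep a x) (none, none)

-- one iteration of B's outer loop body
def stepB (a : List Int) (i : Nat) (s : StB) : StB :=
  let x := a.getD i 0
  let ud := scanPair a x i
  -- if up is not None: odd[i] = even[up]
  let odd1 := match ud.1 with
    | some u => s.odd.set i (s.even.getD u false)
    | none => s.odd
  -- if odd[i]: res += 1
  let res1 := match ud.1 with
    | some _ => if odd1.getD i false = true then s.res + 1 else s.res
    | none => s.res
  -- if down is not None: even[i] = odd[down]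
  let even1 := match ud.2 with
    | some d => s.even.set i (odd1.getD d false)
    | none => s.even
  ⟨odd1, even1, res1⟩

def loopB (a : List Int) : Nat → StB → StB
  | 0, s => s
  | n + 1, s => loopB a n (stepB a n s)

def oddEvenJumps_v2_alt (A : List Int) : Int :=
  let N := A.length
  let odd0 : List Bool := (List.replicate N false).set (N - 1) true
  let even0 : List Bool := (List.replicate N false).set (N - 1) true
  (loopB A (N - 1) ⟨odd0, even0, 1⟩).res

-- ===== PRECONDITION & SPEC =====
-- Python A raises IndexError on the empty list (A[N-1] with N = 0); B raises there too.
def Pre_oddEvenJumps_v2 (A : List Int) : Prop := A ≠ []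
instance (A : List Int) : Decidable (Pre_oddEvenJumps_v2 A) := by
  unfold Pre_oddEvenJumps_v2; infer_instance

def pvWitness_oddEvenJumps_v2 : List Int := [2, 3, 1, 1, 4]

def Spec_oddEvenJumps_v2 (A : List Int) (out : Int) : Prop := out = oddEvenJumps_v2_alt A
instance (A : List Int) (out : Int) : Decidable (Spec_oddEvenJumps_v2 A out) := by
  unfold Spec_oddEvenJumps_v2; infer_instance

-- ===== CLAIM (what is proved, stated in full; the proofs are below) =====
def Claim_equal_oddEvenJumps_v2 : Prop :=
  ∀ (A : List Int), Dom_oddEvenJumps_v2 A → Pre_oddEvenJumps_v2 A →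
    Spec_oddEvenJumps_v2 A (oddEvenJumps_v2 A)

-- ===== LEMMAS AND PROOFS =====

-- `Keyed a m v j`: j is the first index in [m, N) whose value is v.
def Keyed (a : List Int) (m : Nat) (v : Int) (j : Nat) : Prop :=
  m ≤ j ∧ j < a.length ∧ a.getD j 0 = v ∧ ∀ k, m ≤ k → k < j → a.getD k 0 ≠ v

-- A's `vals` is exactly the set of (value, first index) pairs of the suffix [m, N).
def MemSpec (a : List Int) (m : Nat) (vs : List (Int × Nat)) : Prop :=
  ∀ v j, ((v, j) ∈ vs ↔ Keyed a m v j)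

def LoopInv (a : List Int) (m : Nat) (sA : StA) (sB : StB) : Prop :=
  sA.vals.Pairwise (fun p q => p.1 < q.1) ∧
  MemSpec a m sA.vals ∧
  sA.dpO = sB.odd ∧ sA.dpE = sB.even ∧ sA.res = sB.res ∧
  sB.odd.length = a.length ∧ sB.even.length = a.length

-- counting a downward-closed predicate on a sorted list locates its boundary
lemma countP_mono_iff {α : Type} (P : α → Bool) :
    ∀ (l : List α), l.Pairwise (fun p q => P q = true → P p = true) →
    ∀ i (h : i < l.length), (P l[i] = true ↔ i < l.countP P) := by
  intro l
  induction l with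
  | nil => intro _ i h; simp at h
  | cons p t ih =>
    intro hp i h
    have hpt := List.pairwise_cons.mp hp
    by_cases hP : P p = true
    · cases i with
      | zero => simp [hP]
      | succ i =>
        have hi : i < t.length := by simpa using h
        have := ih hpt.2 i hi
        rw [List.countP_cons, if_pos hP, List.getElem_cons_succ, this]
        omega
    · have hz : t.countP P = 0 :=
        List.countP_eq_zero.mpr (fun q hq hPq => hP (hpt.1 q hq hPq))
      rw [List.countP_cons, if_neg hP, hz]
      cases i with
      | zero => simp [hP]
      | succ i =>
        have hi : i < t.length := by simpa using h
        rw [List.getElem_cons_succ]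
        constructor
        · intro h'
          exact absurd (hpt.1 _ (List.getElem_mem hi) h') hP
        · omega

lemma exists_keyed (a : List Int) (m : Nat) :
    ∀ j, m ≤ j → j < a.length → ∃ j0, j0 ≤ j ∧ Keyed a m (a.getD j 0) j0 := by
  intro j
  induction j using Nat.strong_induction_on with
  | _ j ih =>
    intro hm hj
    by_cases hk : ∃ k, m ≤ k ∧ k < j ∧ a.getD k 0 = a.getD j 0
    · obtain ⟨k, h1, h2, h3⟩ := hk
      obtain ⟨j0, hle, hK⟩ := ih k h2 h1 (h2.trans hj)
      rw [h3] at hK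
      exact ⟨j0, hle.trans h2.le, hK⟩
    · exact ⟨j, le_rfl, hm, hj, rfl, fun k h1 h2 he => hk ⟨k, h1, h2, he⟩⟩

-- invariants of B's scan
def UpInv (a : List Int) (x : Int) (lo s : Nat) : Option Nat → Prop
  | none => ∀ j, lo ≤ j → j < s → a.getD j 0 < x
  | some u => lo ≤ u ∧ u < s ∧ x ≤ a.getD u 0 ∧
      ∀ j, lo ≤ j → j < s → x ≤ a.getD j 0 →
        a.getD u 0 < a.getD j 0 ∨ (a.getD u 0 = a.getD j 0 ∧ u ≤ j)

def DownInv (a : List Int) (x : Int) (lo s : Nat) : Option Nat → Prop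
  | none => ∀ j, lo ≤ j → j < s → x < a.getD j 0
  | some d => lo ≤ d ∧ d < s ∧ a.getD d 0 ≤ x ∧
      ∀ j, lo ≤ j → j < s → a.getD j 0 ≤ x →
        a.getD j 0 < a.getD d 0 ∨ (a.getD j 0 = a.getD d 0 ∧ d ≤ j)

lemma upStep (a : List Int) (x : Int) (lo s : Nat) (o : Option Nat × Option Nat)
    (hls : lo ≤ s) (h : UpInv a x lo s o.1) : UpInv a x lo (s + 1) (scanStep a x o s).1 := by
  have e : (scanStep a x o s).1 = updUp a x o.1 s := rfl
  rw [e]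
  rcases ho : o.1 with _ | u <;> rw [ho] at h <;> simp only [updUp] at h ⊢ <;> simp only [UpInv] at h
  · split_ifs with hxs
    · simp only [UpInv]
      exact ⟨hls, by omega, hxs, fun j hj1 hj2 hj3 => by
        rcases Nat.lt_or_ge j s with hjs | hjs
        · exact absurd (h j hj1 hjs) (by omega)
        · have : j = s := by omega
          subst this
          exact Or.inr ⟨rfl, le_rfl⟩⟩
    · simp only [UpInv]
      intro j hj1 hj2
      rcases Nat.lt_or_ge j s with hjs | hjs
      · exact h j hj1 hjs
      · have : j = s := by omega
        subst this; omega
  · obtain ⟨h1, h2, h3, h4⟩ := h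
    split_ifs with hc
    · simp only [UpInv]
      refine ⟨hls, by omega, hc.1, fun j hj1 hj2 hj3 => ?_⟩
      rcases Nat.lt_or_ge j s with hjs | hjs
      · rcases h4 j hj1 hjs hj3 with h' | h'
        · exact Or.inl (by omega)
        · exact Or.inl (by omega)
      · have : j = s := by omega
        subst this; exact Or.inr ⟨rfl, le_rfl⟩
    · simp only [UpInv]
      refine ⟨h1, by omega, h3, fun j hj1 hj2 hj3 => ?_⟩
      rcases Nat.lt_or_ge j s with hjs | hjs
      · exact h4 j hj1 hjs hj3
      · have hjeq : j = s := by omega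
        subst hjeq
        have hle : a.getD u 0 ≤ a.getD j 0 := by
          by_contra hlt
          exact hc ⟨hj3, by omega⟩
        rcases lt_or_eq_of_le hle with h' | h'
        · exact Or.inl h'
        · exact Or.inr ⟨h', by omega⟩

lemma downStep (a : List Int) (x : Int) (lo s : Nat) (o : Option Nat × Option Nat)
    (hls : lo ≤ s) (h : DownInv a x lo s o.2) : DownInv a x lo (s + 1) (scanStep a x o s).2 := by
  have e : (scanStep a x o s).2 = updDown a x o.2 s := rfl
  rw [e]
  rcases ho : o.2 with _ | d <;> rw [ho] at h <;> simp only [updDown] at h ⊢ <;> simp only [DownInv] at h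
  · split_ifs with hxs
    · simp only [DownInv]
      exact ⟨hls, by omega, hxs, fun j hj1 hj2 hj3 => by
        rcases Nat.lt_or_ge j s with hjs | hjs
        · exact absurd (h j hj1 hjs) (by omega)
        · have : j = s := by omega
          subst this
          exact Or.inr ⟨rfl, le_rfl⟩⟩
    · simp only [DownInv]
      intro j hj1 hj2
      rcases Nat.lt_or_ge j s with hjs | hjs
      · exact h j hj1 hjs
      · have : j = s := by omega
        subst this; omega
  · obtain ⟨h1, h2, h3, h4⟩ := h
    split_ifs with hc
    · simp only [DownInv]
      refine ⟨hls, by omega, hc.1, fun j hj1 hj2 hj3 => ?_⟩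
      rcases Nat.lt_or_ge j s with hjs | hjs
      · rcases h4 j hj1 hjs hj3 with h' | h'
        · exact Or.inl (by omega)
        · exact Or.inl (by omega)
      · have : j = s := by omega
        subst this; exact Or.inr ⟨rfl, le_rfl⟩
    · simp only [DownInv]
      refine ⟨h1, by omega, h3, fun j hj1 hj2 hj3 => ?_⟩
      rcases Nat.lt_or_ge j s with hjs | hjs
      · exact h4 j hj1 hjs hj3
      · have hjeq : j = s := by omega
        subst hjeq
        have hle : a.getD j 0 ≤ a.getD d 0 := by
          by_contra hlt
          exact hc ⟨hj3, by omega⟩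
        rcases lt_or_eq_of_le hle with h' | h'
        · exact Or.inl h'
        · exact Or.inr ⟨h', by omega⟩

lemma scan_inv (a : List Int) (x : Int) (lo : Nat) :
    ∀ (len s : Nat), lo ≤ s → ∀ (o : Option Nat × Option Nat),
      UpInv a x lo s o.1 → DownInv a x lo s o.2 →
      UpInv a x lo (s + len) (((List.range' s len).foldl (scanStep a x) o)).1 ∧
      DownInv a x lo (s + len) (((List.range' s len).foldl (scanStep a x) o)).2 := by
  intro len
  induction len with
  | zero => intro s hls o h1 h2; simpa using ⟨h1, h2⟩
  | succ len ih =>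
    intro s hls o h1 h2
    rw [List.range'_succ, List.foldl_cons,
        show s + (len + 1) = s + 1 + len by omega]
    exact ih (s + 1) (by omega) (scanStep a x o s)
      (upStep a x lo s o hls h1) (downStep a x lo s o hls h2)

lemma scan_total (a : List Int) (x : Int) (n : Nat) (h : n + 1 ≤ a.length) :
    UpInv a x (n + 1) a.length (scanPair a x n).1 ∧
    DownInv a x (n + 1) a.length (scanPair a x n).2 := by
  have := scan_inv a x (n + 1) (a.length - (n + 1)) (n + 1) le_rfl (none, none)
    (fun j h1 h2 => by omega) (fun j h1 h2 => by omega)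
  rw [show n + 1 + (a.length - (n + 1)) = a.length by omega] at this
  exact this

lemma key_lt_iff (vs : List (Int × Nat)) (hs : vs.Pairwise (fun p q => p.1 < q.1)) (x : Int)
    (i : Nat) (h : i < vs.length) :
    (vs[i].1 < x ↔ i < vs.countP (fun p => decide (p.1 < x))) := by
  have := countP_mono_iff (fun p => decide (p.1 < x)) vs
    (hs.imp (fun hab => by
      simp only [decide_eq_true_eq]
      intro h'; omega)) i h
  simpa using this

lemma key_le_iff (vs : List (Int × Nat)) (hs : vs.Pairwise (fun p q => p.1 < q.1)) (x : Int)
    (i : Nat) (h : i < vs.length) :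
    (vs[i].1 ≤ x ↔ i < vs.countP (fun p => decide (p.1 ≤ x))) := by
  have := countP_mono_iff (fun p => decide (p.1 ≤ x)) vs
    (hs.imp (fun hab => by
      simp only [decide_eq_true_eq]
      intro h'; omega)) i h
  simpa using this

lemma sorted_getElem (vs : List (Int × Nat)) (hs : vs.Pairwise (fun p q => p.1 < q.1))
    {i j : Nat} (hi : i < vs.length) (hj : j < vs.length) (hij : i < j) :
    vs[i].1 < vs[j].1 :=
  (List.pairwise_iff_getElem.mp hs) i j hi hj hij

lemma keyed_self (a : List Int) (n : Nat) (hn : n < a.length) : Keyed a n (a.getD n 0) n :=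
  ⟨le_rfl, hn, rfl, fun k hk1 hk2 => by omega⟩

lemma keyed_eq_self (a : List Int) (n : Nat) {v : Int} {j : Nat}
    (hK : Keyed a n v j) (hv : v = a.getD n 0) : j = n := by
  obtain ⟨h1, h2, h3, h4⟩ := hK
  by_contra hne
  exact h4 n le_rfl (by omega) (by rw [hv])

lemma keyed_shift (a : List Int) (n : Nat) {v : Int} {j : Nat} (hv : v ≠ a.getD n 0) :
    (Keyed a (n + 1) v j ↔ Keyed a n v j) := by
  constructor
  · rintro ⟨h1, h2, h3, h4⟩
    refine ⟨by omega, h2, h3, fun k hk1 hk2 => ?_⟩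
    rcases Nat.eq_or_lt_of_le hk1 with he | hl
    · rw [← he]; exact fun hc => hv hc.symm
    · exact h4 k hl hk2
  · rintro ⟨h1, h2, h3, h4⟩
    have hjn : j ≠ n := by rintro rfl; exact hv h3.symm
    exact ⟨by omega, h2, h3, fun k hk1 hk2 => h4 k (by omega) hk2⟩

-- with lo = #keys < x below the length, the scan's `up` is vals[lo]'s stored index
lemma up_eq (a : List Int) (n : Nat) (vs : List (Int × Nat))
    (hs : vs.Pairwise (fun p q => p.1 < q.1)) (hmem : MemSpec a (n + 1) vs)
    (hN : n + 1 < a.length)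
    (hlo : vs.countP (fun p => decide (p.1 < a.getD n 0)) < vs.length) :
    (scanPair a (a.getD n 0) n).1 =
      some (vs.getD (vs.countP (fun p => decide (p.1 < a.getD n 0))) (0, 0)).2 := by
  have hgd : vs.getD (vs.countP (fun p => decide (p.1 < a.getD n 0))) (0, 0) =
      vs[vs.countP (fun p => decide (p.1 < a.getD n 0))] := List.getD_eq_getElem _ _ hlo
  set x := a.getD n 0 with hx
  set lo := vs.countP (fun p => decide (p.1 < x)) with hlodef
  have hkey : ¬ vs[lo].1 < x := fun hc => by
    have := (key_lt_iff vs hs x lo hlo).mp hc; omega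
  have hKlo : Keyed a (n + 1) vs[lo].1 vs[lo].2 :=
    (hmem _ _).1 (by simp [List.getElem_mem hlo])
  obtain ⟨hK1, hK2, hK3, hK4⟩ := hKlo
  have hup := (scan_total a x n (le_of_lt hN)).1
  cases hu : (scanPair a x n).1 with
  | none =>
    exfalso
    rw [hu] at hup
    simp only [UpInv] at hup
    have := hup vs[lo].2 hK1 hK2
    rw [hK3] at this
    omega
  | some u =>
    rw [hu] at hup
    simp only [UpInv] at hup
    obtain ⟨h1, h2, h3, h4⟩ := hup
    obtain ⟨j0, hj0u, hKu⟩ := exists_keyed a (n + 1) u h1 h2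
    have hmemu : (a.getD u 0, j0) ∈ vs := (hmem _ _).2 hKu
    obtain ⟨idx, hidx, hvidx⟩ := List.mem_iff_getElem.mp hmemu
    have hkeyidx : vs[idx].1 = a.getD u 0 := by rw [hvidx]
    have hge : lo ≤ idx := by
      by_contra hlt
      have : vs[idx].1 < x := (key_lt_iff vs hs x idx hidx).mpr (by omega)
      rw [hkeyidx] at this
      omega
    have hlekey : vs[lo].1 ≤ a.getD u 0 := by
      rcases Nat.eq_or_lt_of_le hge with he | hl
      · subst he
        exact le_of_eq hkeyidx
      · rw [← hkeyidx]
        exact le_of_lt (sorted_getElem vs hs hlo hidx hl)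
    have hminlo := h4 vs[lo].2 hK1 hK2 (by rw [hK3]; omega)
    rw [hK3] at hminlo
    rcases hminlo with hc | ⟨heq, hule⟩
    · omega
    · have hgeu : vs[lo].2 ≤ u := by
        by_contra hcc
        exact hK4 u h1 (by omega) heq
      have : u = vs[lo].2 := le_antisymm hule hgeu
      rw [hgd, this]

lemma up_none (a : List Int) (n : Nat) (vs : List (Int × Nat))
    (hs : vs.Pairwise (fun p q => p.1 < q.1)) (hmem : MemSpec a (n + 1) vs)
    (hN : n + 1 < a.length)
    (hlo : ¬ vs.countP (fun p => decide (p.1 < a.getD n 0)) < vs.length) :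
    (scanPair a (a.getD n 0) n).1 = none := by
  set x := a.getD n 0 with hx
  have hup := (scan_total a x n (le_of_lt hN)).1
  cases hu : (scanPair a x n).1 with
  | none => rfl
  | some u =>
    exfalso
    rw [hu] at hup
    simp only [UpInv] at hup
    obtain ⟨h1, h2, h3, _⟩ := hup
    obtain ⟨j0, hj0u, hKu⟩ := exists_keyed a (n + 1) u h1 h2
    obtain ⟨idx, hidx, hvidx⟩ := List.mem_iff_getElem.mp ((hmem _ _).2 hKu)
    have : vs[idx].1 < x := (key_lt_iff vs hs x idx hidx).mpr (by omega)
    rw [hvidx] at this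
    omega

lemma down_eq (a : List Int) (n : Nat) (vs : List (Int × Nat))
    (hs : vs.Pairwise (fun p q => p.1 < q.1)) (hmem : MemSpec a (n + 1) vs)
    (hN : n + 1 < a.length)
    (hhi : 0 < vs.countP (fun p => decide (p.1 ≤ a.getD n 0))) :
    (scanPair a (a.getD n 0) n).2 =
      some (vs.getD (vs.countP (fun p => decide (p.1 ≤ a.getD n 0)) - 1) (0, 0)).2 := by
  set x := a.getD n 0 with hx
  set hi := vs.countP (fun p => decide (p.1 ≤ x)) with hhidef
  have hhile : hi ≤ vs.length := List.countP_le_length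
  have hm1 : hi - 1 < vs.length := by omega
  have hgd : vs.getD (hi - 1) (0, 0) = vs[hi - 1] := List.getD_eq_getElem _ _ hm1
  have hkey : vs[hi - 1].1 ≤ x := (key_le_iff vs hs x (hi - 1) hm1).mpr (by omega)
  have hKlo : Keyed a (n + 1) vs[hi - 1].1 vs[hi - 1].2 :=
    (hmem _ _).1 (by simp [List.getElem_mem hm1])
  obtain ⟨hK1, hK2, hK3, hK4⟩ := hKlo
  have hdown := (scan_total a x n (le_of_lt hN)).2
  cases hu : (scanPair a x n).2 with
  | none =>
    exfalso
    rw [hu] at hdown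
    simp only [DownInv] at hdown
    have := hdown vs[hi - 1].2 hK1 hK2
    rw [hK3] at this
    omega
  | some d =>
    rw [hu] at hdown
    simp only [DownInv] at hdown
    obtain ⟨h1, h2, h3, h4⟩ := hdown
    obtain ⟨j0, hj0d, hKd⟩ := exists_keyed a (n + 1) d h1 h2
    obtain ⟨idx, hidx, hvidx⟩ := List.mem_iff_getElem.mp ((hmem _ _).2 hKd)
    have hkeyidx : vs[idx].1 = a.getD d 0 := by rw [hvidx]
    have hlt : idx < hi := (key_le_iff vs hs x idx hidx).mp (by rw [hkeyidx]; omega)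
    have hlekey : a.getD d 0 ≤ vs[hi - 1].1 := by
      rcases Nat.eq_or_lt_of_le (show idx ≤ hi - 1 by omega) with he | hl
      · subst he
        exact le_of_eq hkeyidx.symm
      · rw [← hkeyidx]
        exact le_of_lt (sorted_getElem vs hs hidx hm1 hl)
    have hminlo := h4 vs[hi - 1].2 hK1 hK2 (by rw [hK3]; omega)
    rw [hK3] at hminlo
    rcases hminlo with hc | ⟨heq, hdle⟩
    · omega
    · have hged : vs[hi - 1].2 ≤ d := by
        by_contra hcc
        exact hK4 d h1 (by omega) heq.symm
      have : d = vs[hi - 1].2 := le_antisymm hdle hged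
      rw [hgd, this]

lemma down_none (a : List Int) (n : Nat) (vs : List (Int × Nat))
    (hs : vs.Pairwise (fun p q => p.1 < q.1)) (hmem : MemSpec a (n + 1) vs)
    (hN : n + 1 < a.length)
    (hhi : ¬ 0 < vs.countP (fun p => decide (p.1 ≤ a.getD n 0))) :
    (scanPair a (a.getD n 0) n).2 = none := by
  set x := a.getD n 0 with hx
  have hdown := (scan_total a x n (le_of_lt hN)).2
  cases hu : (scanPair a x n).2 with
  | none => rfl
  | some d =>
    exfalso
    rw [hu] at hdown
    simp only [DownInv] at hdown
    obtain ⟨h1, h2, h3, _⟩ := hdown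
    obtain ⟨j0, hj0d, hKd⟩ := exists_keyed a (n + 1) d h1 h2
    obtain ⟨idx, hidx, hvidx⟩ := List.mem_iff_getElem.mp ((hmem _ _).2 hKd)
    have : idx < vs.countP (fun p => decide (p.1 ≤ x)) :=
      (key_le_iff vs hs x idx hidx).mp (by rw [hvidx]; omega)
    omega

-- the vals update keeps the sortedness and first-index characterisation
lemma vals_update (a : List Int) (n : Nat) (vs : List (Int × Nat))
    (hs : vs.Pairwise (fun p q => p.1 < q.1)) (hmem : MemSpec a (n + 1) vs)
    (hN : n + 1 < a.length) :
    ((if vs.countP (fun p => decide (p.1 < a.getD n 0)) < vs.length ∧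
          (vs.getD (vs.countP (fun p => decide (p.1 < a.getD n 0))) (0, 0)).1 = a.getD n 0 then
        vs.set (vs.countP (fun p => decide (p.1 < a.getD n 0))) (a.getD n 0, n)
      else vs.insertIdx (vs.countP (fun p => decide (p.1 < a.getD n 0))) (a.getD n 0, n)).Pairwise
        (fun p q => p.1 < q.1)) ∧
    MemSpec a n
      (if vs.countP (fun p => decide (p.1 < a.getD n 0)) < vs.length ∧
          (vs.getD (vs.countP (fun p => decide (p.1 < a.getD n 0))) (0, 0)).1 = a.getD n 0 then
        vs.set (vs.countP (fun p => decide (p.1 < a.getD n 0))) (a.getD n 0, n)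
      else vs.insertIdx (vs.countP (fun p => decide (p.1 < a.getD n 0))) (a.getD n 0, n)) := by
  set x := a.getD n 0 with hx
  set lo := vs.countP (fun p => decide (p.1 < x)) with hlodef
  have hlole : lo ≤ vs.length := List.countP_le_length
  have keys_lt : ∀ i (h : i < vs.length), i < lo → vs[i].1 < x :=
    fun i h hi => (key_lt_iff vs hs x i h).mpr hi
  have keys_ge : ∀ i (h : i < vs.length), lo ≤ i → x ≤ vs[i].1 := by
    intro i h hi
    by_contra hc
    have := (key_lt_iff vs hs x i h).mp (by omega)
    omega
  have hKself : Keyed a n x n := by rw [hx]; exact keyed_self a n (by omega)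
  split_ifs with hcond
  · obtain ⟨hlo, hkeyx⟩ := hcond
    rw [List.getD_eq_getElem _ _ hlo] at hkeyx
    constructor
    · rw [List.pairwise_iff_getElem]
      intro i j hi hj hij
      rw [List.length_set] at hi hj
      rw [List.getElem_set, List.getElem_set]
      split_ifs with h1 h2 h2
      · omega
      · show x < vs[j].1
        rw [← hkeyx]
        exact sorted_getElem vs hs hlo hj (by omega)
      · show vs[i].1 < x
        exact keys_lt i hi (by omega)
      · exact sorted_getElem vs hs hi hj hij
    · intro v j
      constructor
      · intro hmem'
        obtain ⟨idx, hidx, hvidx⟩ := List.mem_iff_getElem.mp hmem'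
        rw [List.length_set] at hidx
        rw [List.getElem_set] at hvidx
        by_cases hil : lo = idx
        · rw [if_pos hil] at hvidx
          obtain ⟨rfl, rfl⟩ : x = v ∧ n = j := Prod.mk.injEq .. ▸ hvidx
          exact hKself
        · rw [if_neg hil] at hvidx
          have hKold : Keyed a (n + 1) v j := (hmem v j).1 (hvidx ▸ List.getElem_mem hidx)
          have hvne : v ≠ x := by
            have hv1 : vs[idx].1 = v := by rw [hvidx]
            rcases Nat.lt_or_ge idx lo with hl | hg
            · have := keys_lt idx hidx hl
              omega
            · have hgt : vs[lo].1 < vs[idx].1 :=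
                sorted_getElem vs hs hlo hidx (by omega)
              rw [hkeyx] at hgt
              omega
          exact (keyed_shift a n (hx ▸ hvne)).mp hKold
      · intro hK
        by_cases hvx : v = x
        · have hjn : j = n := keyed_eq_self a n hK (by rw [hvx, hx])
          rw [hvx, hjn]
          have hlo' : lo < (vs.set lo (x, n)).length := by rw [List.length_set]; exact hlo
          have hsel : (vs.set lo (x, n))[lo]'hlo' = (x, n) := List.getElem_set_self hlo'
          exact List.mem_of_getElem hsel
        · have hKold := (keyed_shift a n (hx ▸ hvx)).mpr hK
          obtain ⟨idx, hidx, hvidx⟩ := List.mem_iff_getElem.mp ((hmem v j).2 hKold)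
          have hne : lo ≠ idx := by
            intro he
            apply hvx
            subst he
            rw [← hkeyx, hvidx]
          have hidx' : idx < (vs.set lo (x, n)).length := by
            rw [List.length_set]; exact hidx
          have : (vs.set lo (x, n))[idx]'hidx' = (v, j) := by
            rw [List.getElem_set, if_neg hne, hvidx]
          exact this ▸ List.getElem_mem hidx'
  · have keys_gt : ∀ i (h : i < vs.length), lo ≤ i → x < vs[i].1 := by
      intro i h hi
      rcases Nat.eq_or_lt_of_le hi with he | hl
      · have hge := keys_ge i h hi
        have hne : vs[i].1 ≠ x := by
          intro hc
          apply hcond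
          refine ⟨he ▸ h, ?_⟩
          rw [List.getD_eq_getElem _ _ (he ▸ h)]
          exact he ▸ hc
        omega
      · have h1 := sorted_getElem vs hs (lt_trans hl h) h hl
        have h2 := keys_ge lo (lt_trans hl h) le_rfl
        omega
    have hlen : (vs.insertIdx lo (x, n)).length = vs.length + 1 := by
      rw [List.length_insertIdx, if_pos hlole]
    constructor
    · rw [List.pairwise_iff_getElem]
      intro i j hi hj hij
      rw [hlen] at hi hj
      rw [List.getElem_insertIdx, List.getElem_insertIdx]
      split_ifs with h1 h2 h3 h4 h5 h6 h7
      · exact sorted_getElem vs hs (by omega) (by omega) hij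
      · show vs[i].1 < x
        exact keys_lt i (by omega) (by omega)
      · show vs[i].1 < vs[j - 1].1
        exact sorted_getElem vs hs (by omega) (by omega) (by omega)
      · omega
      · omega
      · show x < vs[j - 1].1
        exact keys_gt (j - 1) (by omega) (by omega)
      · omega
      · omega
      · show vs[i - 1].1 < vs[j - 1].1
        exact sorted_getElem vs hs (by omega) (by omega) (by omega)
    · intro v j
      rw [List.mem_insertIdx hlole]
      constructor
      · rintro (he | hmem')
        · obtain ⟨rfl, rfl⟩ : v = x ∧ j = n := Prod.mk.injEq .. ▸ he
          exact hKself
        · have hKold := (hmem v j).1 hmem'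
          have hvne : v ≠ x := by
            obtain ⟨idx, hidx, hvidx⟩ := List.mem_iff_getElem.mp hmem'
            have hv1 : vs[idx].1 = v := by rw [hvidx]
            rcases Nat.lt_or_ge idx lo with hl | hg
            · have := keys_lt idx hidx hl
              omega
            · have := keys_gt idx hidx hg
              omega
          exact (keyed_shift a n (hx ▸ hvne)).mp hKold
      · intro hK
        by_cases hvx : v = x
        · left
          rw [hvx, keyed_eq_self a n hK (by rw [hvx, hx])]
        · right
          exact (hmem v j).2 ((keyed_shift a n (hx ▸ hvx)).mpr hK)

lemma step_inv (a : List Int) (n : Nat) (hn : n + 1 < a.length) (sA : StA) (sB : StB)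
    (h : LoopInv a (n + 1) sA sB) : LoopInv a n (stepA a n sA) (stepB a n sB) := by
  obtain ⟨hs, hmem, hO, hE, hres, hlenO, hlenE⟩ := h
  have hbl : bisectLeft (sA.vals.map Prod.fst) (a.getD n 0) =
      sA.vals.countP (fun p => decide (p.1 < a.getD n 0)) := by
    simp [bisectLeft, List.countP_map, Function.comp_def]
  have hbr : bisectRight (sA.vals.map Prod.fst) (a.getD n 0) =
      sA.vals.countP (fun p => decide (p.1 ≤ a.getD n 0)) := by
    simp [bisectRight, List.countP_map, Function.comp_def]
  refine ⟨?_, ?_, ?_, ?_, ?_, ?_, ?_⟩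
  · simp only [stepA, hbl]
    exact (vals_update a n sA.vals hs hmem hn).1
  · simp only [stepA, hbl]
    exact (vals_update a n sA.vals hs hmem hn).2
  · simp only [stepA, stepB, hbl]
    rcases Nat.lt_or_ge (sA.vals.countP (fun p => decide (p.1 < a.getD n 0)))
        sA.vals.length with hlo | hlo
    · rw [if_pos hlo, up_eq a n sA.vals hs hmem hn hlo, hO, hE]
    · rw [if_neg (by omega), up_none a n sA.vals hs hmem hn (by omega), hO]
  · simp only [stepA, stepB, hbl, hbr]
    rcases Nat.lt_or_ge 0 (sA.vals.countP (fun p => decide (p.1 ≤ a.getD n 0)))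
        with hhi | hhi
    · rcases Nat.lt_or_ge (sA.vals.countP (fun p => decide (p.1 < a.getD n 0)))
          sA.vals.length with hlo | hlo
      · rw [if_pos hhi, if_pos hlo, down_eq a n sA.vals hs hmem hn hhi,
            up_eq a n sA.vals hs hmem hn hlo, hO, hE]
      · rw [if_pos hhi, if_neg (by omega), down_eq a n sA.vals hs hmem hn hhi,
            up_none a n sA.vals hs hmem hn (by omega), hO, hE]
    · rw [if_neg (by omega), down_none a n sA.vals hs hmem hn (by omega), hE]
  · simp only [stepA, stepB, hbl]
    rcases Nat.lt_or_ge (sA.vals.countP (fun p => decide (p.1 < a.getD n 0)))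
        sA.vals.length with hlo | hlo
    · rw [up_eq a n sA.vals hs hmem hn hlo, if_pos hlo, hO, hE, hres]
      exact if_congr (and_iff_right hlo) rfl rfl
    · rw [up_none a n sA.vals hs hmem hn (by omega),
          if_neg (fun hc => absurd hc.1 (by omega))]
      exact hres
  · simp only [stepB]
    cases (scanPair a (a.getD n 0) n).1 <;> simp [List.length_set, hlenO]
  · simp only [stepB]
    cases (scanPair a (a.getD n 0) n).2 <;>
      cases (scanPair a (a.getD n 0) n).1 <;> simp [List.length_set, hlenE]

lemma loop_inv (a : List Int) :
    ∀ n (sA : StA) (sB : StB), n < a.length → LoopInv a n sA sB →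
      (loopA a n sA).res = (loopB a n sB).res := by
  intro n
  induction n with
  | zero => intro sA sB _ h; exact h.2.2.2.2.1
  | succ n ih =>
    intro sA sB hlt h
    exact ih _ _ (Nat.lt_of_succ_lt hlt) (step_inv a n hlt sA sB h)

lemma replicate_set (n : Nat) :
    (List.replicate (n + 1) false).set n true = List.replicate n false ++ [true] := by
  induction n with
  | zero => rfl
  | succ n ih => simpa [List.replicate_succ] using ih

-- ===== VERDICT (by name: the statement is the Claim_ definition above) =====
theorem oddEvenJumps_v2_spec : Claim_equal_oddEvenJumps_v2 := by
  intro A _ hpre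
  have hN : 0 < A.length := List.length_pos_of_ne_nil hpre
  obtain ⟨K, hK⟩ : ∃ K, A.length = K + 1 := ⟨A.length - 1, by omega⟩
  show oddEvenJumps_v2 A = oddEvenJumps_v2_alt A
  simp only [oddEvenJumps_v2, oddEvenJumps_v2_alt]
  apply loop_inv A (A.length - 1) _ _ (by omega)
  refine ⟨List.pairwise_singleton _ _, ?_, ?_, ?_, rfl, ?_, ?_⟩
  · intro v j
    simp only [List.mem_singleton, Prod.mk.injEq]
    constructor
    · rintro ⟨rfl, rfl⟩
      exact ⟨le_rfl, by omega, rfl, fun k hk1 hk2 => by omega⟩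
    · rintro ⟨h1, h2, h3, h4⟩
      have : j = A.length - 1 := by omega
      subst this
      exact ⟨h3.symm, rfl⟩
  · show List.replicate (A.length - 1) false ++ [true] =
      (List.replicate A.length false).set (A.length - 1) true
    rw [hK]
    simp only [Nat.add_sub_cancel]
    exact (replicate_set K).symm
  · show List.replicate (A.length - 1) false ++ [true] =
      (List.replicate A.length false).set (A.length - 1) true
    rw [hK]
    simp only [Nat.add_sub_cancel]
    exact (replicate_set K).symm
  · show ((List.replicate A.length false).set (A.length - 1) true).length = A.length
    rw [List.length_set, List.length_replicate]
  · show ((List.replicate A.length false).set (A.length - 1) true).length = A.length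
    rw [List.length_set, List.length_replicate]
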